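-- pv_equiv track=rewrite | github.com/mariootamoaye/envault | envault/reorder.py | move_key
-- ===== SOURCE A (Python) =====
-- def move_key(
--     data: dict[str, str],
--     key: str,
--     position: int,
-- ) -> dict[str, str]:
--     """Return a new dict with *key* moved to *position* (0-based)."""
--     if key not in data:
--         raise KeyError(f"Key {key!r} not found in vault data.")
--     keys = [k for k in data if k != key]
--     position = max(0, min(position, len(keys)))
--     keys.insert(position, key)
--     return {k: data[k] for k in keys}
-- ===== SOURCE B (Python) =====
-- def move_key(
--     data: dict[str, str],
--     key: str,
--     position: int,
-- ) -> dict[str, str]: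
--     """Return a new dict with *key* moved to *position* (0-based)."""
--     if key not in data:
--         raise KeyError(f"Key {key!r} not found in vault data.")
--     val = data[key]
--     remaining = max(0, min(position, len(data) - 1))
--     result = {}
--     for k, v in data.items():
--         if k == key:
--             continue
--         if remaining == 0:
--             result[key] = val
--         result[k] = v
--         remaining -= 1
--     if remaining == 0:
--         result[key] = val
--     return result
-- ===== Notes on version B (the rewrite author's own statement) =====
-- stated objective: simpler
-- what changed: A builds a key list, clamps, list.insert-s the key and rebuilds the dict by lookups; B makes a single pass over the items with a countdown counter that splices the moved key/value in place, with no intermediate key list, no list.insert and no per-key dict lookups.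
import Mathlib
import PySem

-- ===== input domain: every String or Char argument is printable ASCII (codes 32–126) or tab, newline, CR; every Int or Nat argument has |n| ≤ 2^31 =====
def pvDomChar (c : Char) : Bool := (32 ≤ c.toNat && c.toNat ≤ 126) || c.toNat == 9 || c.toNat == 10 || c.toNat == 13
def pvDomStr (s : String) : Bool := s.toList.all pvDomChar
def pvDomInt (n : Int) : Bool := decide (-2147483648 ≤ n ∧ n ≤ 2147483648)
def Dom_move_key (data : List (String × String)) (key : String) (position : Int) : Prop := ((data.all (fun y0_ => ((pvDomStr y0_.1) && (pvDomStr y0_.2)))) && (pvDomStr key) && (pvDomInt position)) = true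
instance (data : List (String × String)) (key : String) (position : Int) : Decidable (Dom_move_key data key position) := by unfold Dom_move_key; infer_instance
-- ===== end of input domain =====

-- B replaces A's build-key-list / clamp / list.insert / rebuild-dict pipeline by a single pass
-- over the items with a decreasing counter that splices the moved key in place (objective: simpler).

-- ===== PORT A =====
def move_key (data : List (String × String)) (key : String) (position : Int) : List (String × String) :=
  let d := PySem.Dict.mk data
  if d.contains key = false then []   -- Python raises KeyError here; excluded by Pre_move_key
  else
    let keys := d.keys.filter (fun k => k != key)
    let position := max 0 (min position (keys.length : Int))
    let keys := PySem.List.insert keys position key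
    keys.map (fun k => (k, d.getD k ""))

-- ===== PORT B =====
-- the loop of Source B: walk the items once; `remaining` counts down to the splice point
-- (result[k] = v on fresh keys appends, so the built dict is this list of pairs)
def altGo (key val : String) : Int → List (String × String) → List (String × String)
  | remaining, [] => if remaining = 0 then [(key, val)] else []
  | remaining, (k, v) :: rest =>
    if k == key then altGo key val remaining rest
    else if remaining = 0 then (key, val) :: (k, v) :: altGo key val (remaining - 1) rest
    else (k, v) :: altGo key val (remaining - 1) rest

def move_key_alt (data : List (String × String)) (key : String) (position : Int) : List (String × String) :=
  let d := PySem.Dict.mk data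
  if d.contains key = false then []   -- Python raises KeyError here; excluded by Pre_move_key
  else
    let val := d.getD key ""
    let remaining := max 0 (min position ((data.length : Int) - 1))
    altGo key val remaining data

-- ===== PRECONDITION & SPEC =====
-- key must be present (else A raises KeyError); Nodup only states that `data` stands for a
-- Python dict (duplicate keys cannot arise from a dict input), so it excludes no real input.
def Pre_move_key (data : List (String × String)) (key : String) (position : Int) : Prop :=
  key ∈ data.map Prod.fst ∧ (data.map Prod.fst).Nodup
instance (data : List (String × String)) (key : String) (position : Int) : Decidable (Pre_move_key data key position) := by unfold Pre_move_key; infer_instance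
def pvWitness_move_key : (List (String × String)) × String × Int := ([("a","1"),("b","2"),("c","3")], "a", 1)

def Spec_move_key (data : List (String × String)) (key : String) (position : Int) (out : List (String × String)) : Prop := out = move_key_alt data key position
instance (data : List (String × String)) (key : String) (position : Int) (out : List (String × String)) : Decidable (Spec_move_key data key position out) := by unfold Spec_move_key; infer_instance

-- ===== CLAIM (what is proved, stated in full; the proofs are below) =====
def Claim_equal_move_key : Prop := ∀ (data : List (String × String)) (key : String) (position : Int), Dom_move_key data key position → Pre_move_key data key position → Spec_move_key data key position (move_key data key position)

-- ===== LEMMAS AND PROOFS =====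

-- once the counter has gone negative the pass just copies the remaining non-key items
theorem altGo_neg (key val : String) (r : Int) (l : List (String × String)) (h : r < 0) :
    altGo key val r l = l.filter (fun kv => kv.1 != key) := by
  induction l generalizing r with
  | nil => simp [altGo]; omega
  | cons kv rest ih =>
    obtain ⟨k, v⟩ := kv
    by_cases hk : k = key
    · subst hk; simp [altGo, List.filter_cons, ih r h]
    · simp [altGo, hk, ih (r - 1) (by omega)]
      omega

-- the single pass produces take / moved pair / drop of the filtered items
set_option maxRecDepth 4000 in
theorem altGo_eq (key val : String) (r : Int) (l : List (String × String)) (h0 : 0 ≤ r)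
    (hle : r.toNat ≤ (l.filter (fun kv => kv.1 != key)).length) :
    altGo key val r l =
      (l.filter (fun kv => kv.1 != key)).take r.toNat ++ (key, val) ::
        (l.filter (fun kv => kv.1 != key)).drop r.toNat := by
  induction l generalizing r with
  | nil =>
    simp only [List.filter_nil, List.length_nil, Nat.le_zero] at hle
    simp [altGo, (by omega : r = 0)]
  | cons kv rest ih =>
    obtain ⟨k, v⟩ := kv
    by_cases hk : k = key
    · subst hk
      simpa [altGo, List.filter_cons] using ih r h0 (by simpa [List.filter_cons] using hle)
    · by_cases hr : r = 0
      · subst hr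
        have h1 : altGo key val 0 ((k, v) :: rest) =
            (key, val) :: (k, v) :: altGo key val (0 - 1) rest := by
          simp [altGo, hk]
        rw [h1, show (0 : Int) - 1 = -1 from rfl, altGo_neg key val (-1) rest (by omega)]
        simp [List.filter_cons, hk]
      · simp only [List.filter_cons, bne_iff_ne, ne_eq, hk, not_false_iff, decide_true,
          if_pos, List.length_cons] at hle ⊢
        simp only [altGo, beq_iff_eq, hk, if_neg, not_false_iff, hr, if_false]
        rw [ih (r - 1) (by omega) (by omega)]
        have hrt : r.toNat = (r - 1).toNat + 1 := by omega
        rw [hrt, List.take_succ_cons, List.drop_succ_cons, List.cons_append]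

-- a key absent from the list leaves the filter untouched
theorem filter_of_not_mem (key : String) (l : List String) (h : key ∉ l) :
    l.filter (fun k => k != key) = l := by
  induction l with
  | nil => rfl
  | cons a rest ih =>
    simp only [List.mem_cons, not_or] at h
    simp [List.filter_cons, bne_iff_ne, Ne.symm h.1, ih h.2]

-- with key present exactly once, filtering it out drops exactly one element
theorem length_filter_key (key : String) (l : List String) :
    key ∈ l → l.Nodup → (l.filter (fun k => k != key)).length + 1 = l.length := by
  induction l with
  | nil => intro hmem; cases hmem
  | cons a rest ih =>
    intro hmem hnd
    rcases List.nodup_cons.mp hnd with ⟨ha, hrest⟩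
    by_cases hk : a = key
    · subst hk
      simp [List.filter_cons, filter_of_not_mem a rest ha]
    · have hm : key ∈ rest := by
        rcases List.mem_cons.mp hmem with h | h
        · exact absurd h.symm hk
        · exact h
      have := ih hm hrest
      simp only [List.filter_cons, bne_iff_ne, ne_eq, hk, not_false_iff, decide_true, if_pos,
        List.length_cons]
      omega

-- mapping the A-side rebuild over the kept keys restores the kept pairs
theorem map_rebuild (data : List (String × String)) (key : String)
    (hnd : (data.map Prod.fst).Nodup) :
    ((data.filter (fun kv => kv.1 != key)).map Prod.fst).map
        (fun k => (k, (PySem.Dict.mk data).getD k "")) =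
      data.filter (fun kv => kv.1 != key) := by
  rw [List.map_map]
  have hpt : ∀ kv ∈ data.filter (fun kv => kv.1 != key),
      ((fun k => (k, (PySem.Dict.mk data).getD k "")) ∘ Prod.fst) kv = id kv := by
    intro kv hkv
    have hmem : kv ∈ data := List.mem_of_mem_filter hkv
    obtain ⟨k, v⟩ := kv
    have : (PySem.Dict.mk data).getD k "" = v :=
      PySem.Dict.getD_of_mem_items (PySem.Dict.mk data) hmem hnd ""
    simp [this]
  rw [List.map_congr_left hpt, List.map_id]

theorem move_key_eq_alt (data : List (String × String)) (key : String) (position : Int)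
    (hpre : Pre_move_key data key position) :
    move_key data key position = move_key_alt data key position := by
  obtain ⟨hmem, hnd⟩ := hpre
  have hcont : (PySem.Dict.mk data).contains key = true := by
    rcases List.mem_map.mp hmem with ⟨kv, hkv, hfst⟩
    simp only [PySem.Dict.contains, List.any_eq_true]
    exact ⟨kv, hkv, by simp [hfst]⟩
  have hfm : (data.map Prod.fst).filter (fun k => k != key) =
      (data.filter (fun kv => kv.1 != key)).map Prod.fst := by
    rw [List.filter_map]; rfl
  have hlen1 : ((data.map Prod.fst).filter (fun k => k != key)).length + 1 = data.length := by
    have := length_filter_key key (data.map Prod.fst) hmem hnd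
    simpa using this
  have hkl : (data.filter (fun kv => kv.1 != key)).length + 1 = data.length := by
    rw [hfm, List.length_map] at hlen1; exact hlen1
  -- the two clamped positions agree
  have hposeq : max 0 (min position ((((data.map Prod.fst).filter (fun k => k != key)).length : Nat) : Int))
      = max 0 (min position ((data.length : Int) - 1)) := by omega
  set r := max 0 (min position ((data.length : Int) - 1)) with hrdef
  have hr0 : 0 ≤ r := by omega
  have hrle : r.toNat ≤ (data.filter (fun kv => kv.1 != key)).length := by omega
  have hrleF : r.toNat ≤ ((data.map Prod.fst).filter (fun k => k != key)).length := by omega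
  simp only [move_key, move_key_alt, hcont, Bool.true_eq_false, if_false]
  rw [altGo_eq key ((PySem.Dict.mk data).getD key "") r data hr0 hrle]
  have hkeys : (PySem.Dict.mk data).keys = data.map Prod.fst := rfl
  rw [hkeys, hposeq]
  rw [show r = ((r.toNat : Nat) : Int) from by omega,
    PySem.List.insert_natCast _ _ _ hrleF]
  rw [List.map_append, List.map_cons]
  have mr := map_rebuild data key hnd
  have htake : (((data.map Prod.fst).filter (fun k => k != key)).take r.toNat).map
      (fun k => (k, (PySem.Dict.mk data).getD k "")) =
      (data.filter (fun kv => kv.1 != key)).take r.toNat := by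
    rw [hfm, List.map_take, mr]
  have hdrop : (((data.map Prod.fst).filter (fun k => k != key)).drop r.toNat).map
      (fun k => (k, (PySem.Dict.mk data).getD k "")) =
      (data.filter (fun kv => kv.1 != key)).drop r.toNat := by
    rw [hfm, List.map_drop, mr]
  rw [htake, hdrop]
  simp [max_eq_left hr0]

-- ===== VERDICT (by name: the statement is the Claim_ definition above) =====
theorem move_key_spec : Claim_equal_move_key := by
  intro data key position _ hpre
  exact move_key_eq_alt data key position hpre
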